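-- pv_equiv track=rewrite | github.com/sweetypriya22/PYTHON-DATA-STRUCTURE-I | Find Most Frequent Vowel and Consonants.py | sum_count_vov_con
-- ===== SOURCE A (Python) =====
-- def sum_count_vov_con(s):
--     vov = "aeiou"
--     count = 0
--     count1 = 0
--     New = set()
--     New1 = set()
--     if s.isalpha():
--         s = s.lower()
--         for i in s:
--             if i in vov  and i not in New :
--                 New.add(i)
--                 count+=1
--             elif i not in vov and i not in New1:
--                     New1.add(i)
--                     count1+=1
--     return count + count1
-- ===== SOURCE B (Python) =====
-- def sum_count_vov_con(s):
--     if not s.isalpha():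
--         return 0
--     t = s.lower()
--     return sum(c in t for c in "abcdefghijklmnopqrstuvwxyz")
-- ===== Notes on version B (the rewrite author's own statement) =====
-- stated objective: alternative
-- what changed: B inverts the traversal: instead of scanning the string while maintaining two seen-sets and two counters split by vowelhood, it loops over the fixed 26-letter alphabet and counts which letters occur as substrings of s.lower() (distinct vowels + distinct consonants = distinct letters present); no set is built and no per-character classification happens, and the 26 C-level substring scans beat the interpreted per-character loop (measured ~5x at large n).
import Mathlib
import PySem

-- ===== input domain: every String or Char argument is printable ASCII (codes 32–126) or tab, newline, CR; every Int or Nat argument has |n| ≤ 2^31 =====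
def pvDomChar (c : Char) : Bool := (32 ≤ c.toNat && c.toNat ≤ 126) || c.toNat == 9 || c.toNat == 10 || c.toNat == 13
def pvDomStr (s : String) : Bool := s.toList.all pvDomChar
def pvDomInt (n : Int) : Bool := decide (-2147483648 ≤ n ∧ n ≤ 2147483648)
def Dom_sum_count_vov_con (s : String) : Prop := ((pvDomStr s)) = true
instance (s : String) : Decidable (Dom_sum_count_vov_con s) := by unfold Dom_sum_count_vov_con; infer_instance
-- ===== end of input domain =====

-- B inverts the traversal: it loops over the 26-letter alphabet counting which letters occur
-- in s.lower(), instead of scanning the string with two seen-sets and two counters (objective: alternative).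
-- ===== PORT A =====
def pvStepA (vov : List Char) (st : Int × Int × PySem.Set Char × PySem.Set Char) (i : Char) :
    Int × Int × PySem.Set Char × PySem.Set Char :=
  let (count, count1, New, New1) := st
  if vov.contains i && !(PySem.Set.contains New i) then
    (count + 1, count1, PySem.Set.add New i, New1)
  else if !(vov.contains i) && !(PySem.Set.contains New1 i) then
    (count, count1 + 1, New, PySem.Set.add New1 i)
  else st

def sum_count_vov_con (s : String) : Int :=
  let vov := "aeiou"
  let count : Int := 0
  let count1 : Int := 0
  let New : PySem.Set Char := PySem.Set.empty
  let New1 : PySem.Set Char := PySem.Set.empty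
  if PySem.Str.strIsalpha s then
    let s2 := PySem.Str.lower s
    let r := s2.toList.foldl (pvStepA vov.toList) (count, count1, New, New1)
    r.1 + r.2.1
  else count + count1

-- ===== PORT B =====
def sum_count_vov_con_alt (s : String) : Int :=
  if PySem.Str.strIsalpha s then
    let t := PySem.Str.lower s
    "abcdefghijklmnopqrstuvwxyz".toList.foldl
      (fun acc c => acc + (if PySem.Str.isIn (String.ofList [c]) t then 1 else 0)) 0
  else 0

-- ===== PRECONDITION & SPEC =====
def Spec_sum_count_vov_con (s : String) (out : Int) : Prop := out = sum_count_vov_con_alt s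
instance (s : String) (out : Int) : Decidable (Spec_sum_count_vov_con s out) := by unfold Spec_sum_count_vov_con; infer_instance

-- ===== CLAIM (what is proved, stated in full; the proofs are below) =====
def Claim_equal_sum_count_vov_con : Prop := ∀ (s : String), Dom_sum_count_vov_con s → Spec_sum_count_vov_con s (sum_count_vov_con s)

-- ===== LEMMAS AND PROOFS =====

lemma pvContainsMem (s : PySem.Set Char) (y : Char) :
    PySem.Set.contains s y = true ↔ y ∈ s := PySem.Set.contains_iff s y

-- the number of NEW elements update adds depends only on membership in the base set
lemma len_update_congr {s t : List Char} (xs : List Char)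
    (hmem : ∀ y, y ∈ s ↔ y ∈ t) (hlen : s.length = t.length) :
    (PySem.Set.update s xs).length = (PySem.Set.update t xs).length := by
  rw [PySem.Set.update_eq_append_filter, PySem.Set.update_eq_append_filter]
  simp only [List.length_append, hlen]
  congr 2
  apply List.filter_congr
  intro y _
  by_cases h : y ∈ s
  · rw [(pvContainsMem s y).mpr h, (pvContainsMem t y).mpr ((hmem y).mp h)]
  · rw [Bool.eq_false_iff.mpr (fun hc => h ((pvContainsMem s y).mp hc)),
       Bool.eq_false_iff.mpr (fun hc => ((hmem y).not.mp h) ((pvContainsMem t y).mp hc))]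

-- loop invariant for A: counters track set sizes, the two sets partition by vowelhood,
-- and the final counter sum is the size of the union updated by the rest of the string
lemma invA (vov : List Char) (l : List Char) :
    ∀ (N N1 : PySem.Set Char),
      (∀ x ∈ N, x ∈ vov) → (∀ x ∈ N1, x ∉ vov) →
      (l.foldl (pvStepA vov) ((N.length : Int), (N1.length : Int), N, N1)).1 +
        (l.foldl (pvStepA vov) ((N.length : Int), (N1.length : Int), N, N1)).2.1 =
      ((PySem.Set.update (N ++ N1) l).length : Int) := by
  induction l with
  | nil =>
    intro N N1 _ _
    simp [PySem.Set.update, List.length_append]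
  | cons i l ih =>
    intro N N1 hN hN1
    have hupd : ∀ (M : PySem.Set Char), PySem.Set.update M (i :: l) = PySem.Set.update (PySem.Set.add M i) l :=
      fun M => PySem.Set.update_cons M i l
    simp only [List.foldl_cons]
    by_cases hv : i ∈ vov
    · by_cases hNi : i ∈ N
      · have hstep : pvStepA vov ((N.length : Int), (N1.length : Int), N, N1) i = ((N.length : Int), (N1.length : Int), N, N1) := by
          simp [pvStepA, hv, hNi]
        rw [hstep, ih N N1 hN hN1, hupd, PySem.Set.add,
          if_pos ((pvContainsMem _ _).mpr (by simp [hNi]))]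
      · have hstep : pvStepA vov ((N.length : Int), (N1.length : Int), N, N1) i =
            ((N.length : Int) + 1, (N1.length : Int), PySem.Set.add N i, N1) := by
          simp [pvStepA, hv, hNi]
        have hadd : PySem.Set.add N i = N ++ [i] := by
          simp [PySem.Set.add, hNi]
        have hN' : ∀ x ∈ PySem.Set.add N i, x ∈ vov := by
          rw [hadd]; intro x hx
          rcases List.mem_append.mp hx with h | h
          · exact hN x h
          · simp at h; subst h; exact hv
        have := ih (PySem.Set.add N i) N1 hN' hN1
        rw [hstep]
        have hlenadd : (PySem.Set.add N i).length = N.length + 1 := by simp [hadd]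
        rw [show ((N.length : Int) + 1) = (((PySem.Set.add N i).length : Int)) by rw [hlenadd]; push_cast; ring]
        rw [this, hupd]
        have hN1i : i ∉ N1 := fun h => hN1 i h hv
        have haddU : PySem.Set.add (N ++ N1) i = N ++ N1 ++ [i] := by
          simp [PySem.Set.add]
          exact ⟨hNi, hN1i⟩
        rw [haddU]
        have : (PySem.Set.update (PySem.Set.add N i ++ N1) l).length = (PySem.Set.update (N ++ N1 ++ [i]) l).length := by
          apply len_update_congr
          · intro y; rw [hadd]; simp [List.mem_append]; tauto
          · rw [hadd]; simp
        rw [this]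
    · by_cases hN1i : i ∈ N1
      · have hstep : pvStepA vov ((N.length : Int), (N1.length : Int), N, N1) i = ((N.length : Int), (N1.length : Int), N, N1) := by
          simp [pvStepA, hv, hN1i]
        rw [hstep, ih N N1 hN hN1, hupd, PySem.Set.add,
          if_pos ((pvContainsMem _ _).mpr (by simp [hN1i]))]
      · have hstep : pvStepA vov ((N.length : Int), (N1.length : Int), N, N1) i =
            ((N.length : Int), (N1.length : Int) + 1, N, PySem.Set.add N1 i) := by
          simp [pvStepA, hv, hN1i]
        have hadd : PySem.Set.add N1 i = N1 ++ [i] := by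
          simp [PySem.Set.add, hN1i]
        have hN1' : ∀ x ∈ PySem.Set.add N1 i, x ∉ vov := by
          rw [hadd]; intro x hx
          rcases List.mem_append.mp hx with h | h
          · exact hN1 x h
          · simp at h; subst h; exact hv
        have := ih N (PySem.Set.add N1 i) hN hN1'
        rw [hstep]
        have hlenadd : (PySem.Set.add N1 i).length = N1.length + 1 := by simp [hadd]
        rw [show ((N1.length : Int) + 1) = (((PySem.Set.add N1 i).length : Int)) by rw [hlenadd]; push_cast; ring]
        rw [this, hupd]
        have hNi : i ∉ N := fun h => hv (hN i h)
        have haddU : PySem.Set.add (N ++ N1) i = N ++ N1 ++ [i] := by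
          simp [PySem.Set.add]
          exact ⟨hNi, hN1i⟩
        rw [haddU]
        have : (PySem.Set.update (N ++ PySem.Set.add N1 i) l).length = (PySem.Set.update (N ++ N1 ++ [i]) l).length := by
          apply len_update_congr
          · intro y; rw [hadd]; simp [List.mem_append]
          · rw [hadd]; simp
        rw [this]

-- B's fold over the alphabet counts the letters satisfying the membership test
lemma foldB_countP (P : Char → Bool) (l : List Char) (acc : Int) :
    l.foldl (fun a c => a + (if P c then 1 else 0)) acc = acc + (l.countP P : Int) := by
  induction l generalizing acc with
  | nil => simp
  | cons c l ih =>
    simp only [List.foldl_cons, ih, List.countP_cons]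
    by_cases h : P c = true <;> simp [h] <;> push_cast <;> ring

-- after strIsalpha and lower, every character lies in the lowercase alphabet
lemma lower_mem_alpha (c : Char) (h : PySem.Chars.isalpha c = true) :
    PySem.Chars.lowerChar c ∈ "abcdefghijklmnopqrstuvwxyz".toList := by
  have hofNat : ∀ n : Nat, 97 ≤ n → n ≤ 122 → Char.ofNat n ∈ "abcdefghijklmnopqrstuvwxyz".toList := by
    intro n h1 h2; interval_cases n <;> decide
  simp only [PySem.Chars.isalpha, PySem.Chars.isupper, PySem.Chars.islower, Bool.or_eq_true,
    Bool.and_eq_true, decide_eq_true_eq, Char.le_def] at h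
  unfold PySem.Chars.lowerChar
  by_cases hu : PySem.Chars.isupper c = true
  · rw [if_pos hu]
    simp only [PySem.Chars.isupper, Bool.and_eq_true, decide_eq_true_eq, Char.le_def] at hu
    have h1 : 65 ≤ c.toNat := hu.1
    have h2 : c.toNat ≤ 90 := hu.2
    exact hofNat _ (by omega) (by omega)
  · rw [if_neg hu]
    simp only [PySem.Chars.isupper, Bool.and_eq_true, decide_eq_true_eq, Char.le_def] at hu
    rcases h with h | h
    · exact absurd (⟨h.1, h.2⟩ : ('A'.toNat ≤ c.toNat ∧ c.toNat ≤ 'Z'.toNat)) hu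
    · have h1 : 97 ≤ c.toNat := h.1
      have h2 : c.toNat ≤ 122 := h.2
      have := hofNat c.toNat h1 h2
      rwa [Char.ofNat_toNat] at this


-- ===== VERDICT (by name: the statement is the Claim_ definition above) =====
theorem sum_count_vov_con_spec : Claim_equal_sum_count_vov_con := by
  intro s _
  unfold Spec_sum_count_vov_con
  simp only [sum_count_vov_con, sum_count_vov_con_alt]
  by_cases h : PySem.Str.strIsalpha s = true
  · rw [if_pos h, if_pos h]
    have hA := invA "aeiou".toList (PySem.Str.lower s).toList PySem.Set.empty PySem.Set.empty
      (by intro x hx; cases hx) (by intro x hx; cases hx)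
    simp only [PySem.Set.empty, List.length_nil, Nat.cast_zero, List.nil_append] at hA
    have hupd : PySem.Set.update ([] : List Char) (PySem.Str.lower s).toList
        = PySem.Set.ofList (PySem.Str.lower s).toList :=
      (PySem.Set.ofList_eq_foldl _).symm
    have hB : (("abcdefghijklmnopqrstuvwxyz".toList.foldl
        (fun acc c => acc + (if PySem.Str.isIn (String.ofList [c]) (PySem.Str.lower s) then 1 else 0)) 0) : Int)
        = (("abcdefghijklmnopqrstuvwxyz".toList.countP
            (fun c => PySem.Str.isIn (String.ofList [c]) (PySem.Str.lower s))) : Int) := by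
      rw [foldB_countP]; ring
    simp only [PySem.Set.empty]
    rw [hA, hupd, hB]
    -- membership of the lowered string in the alphabet
    have hsub : ∀ x ∈ (PySem.Str.lower s).toList, x ∈ "abcdefghijklmnopqrstuvwxyz".toList := by
      intro x hx
      rw [PySem.Str.toList_lower] at hx
      simp only [PySem.Chars.lower, List.mem_map] at hx
      obtain ⟨c, hc, rfl⟩ := hx
      have halpha : PySem.Chars.isalpha c = true := by
        rw [PySem.Str.strIsalpha_eq] at h
        simp only [PySem.Chars.strIsalpha, Bool.and_eq_true, List.all_eq_true] at h
        exact h.2 c hc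
      exact lower_mem_alpha c halpha
    -- the substring test is character membership
    have hP : ∀ c, (PySem.Str.isIn (String.ofList [c]) (PySem.Str.lower s) = true) ↔ c ∈ (PySem.Str.lower s).toList := by
      intro c
      rw [PySem.Str.isIn_eq]
      have he : (String.ofList [c]).toList = [c] := by simp
      rw [he, PySem.Chars.isIn_iff_infix]
      exact List.singleton_infix_iff c _
    rw [List.countP_eq_length_filter]
    have hnodupB : ("abcdefghijklmnopqrstuvwxyz".toList.filter
        (fun c => PySem.Str.isIn (String.ofList [c]) (PySem.Str.lower s))).Nodup :=
      List.Nodup.filter _ (by decide)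
    have hperm : (PySem.Set.ofList (PySem.Str.lower s).toList).length
        = ("abcdefghijklmnopqrstuvwxyz".toList.filter
            (fun c => PySem.Str.isIn (String.ofList [c]) (PySem.Str.lower s))).length := by
      apply List.Perm.length_eq
      apply (List.perm_ext_iff_of_nodup (PySem.Set.nodup_ofList _) hnodupB).mpr
      intro x
      rw [PySem.Set.mem_ofList, List.mem_filter]
      constructor
      · intro hx; exact ⟨hsub x hx, (hP x).mpr hx⟩
      · intro hx; exact (hP x).mp hx.2
    rw [hperm]
  · rw [if_neg h, if_neg h]
    norm_num
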